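-- pv_equiv track=rewrite | github.com/AnnieChmarak/aoc | 2024/16.py | parse
-- ===== SOURCE A (Python) =====
-- Point = tuple[int, int]
--
-- Field = list[list[chr]]
--
-- def parse(input: str, verbose: bool) -> tuple[Field, Point, Point]:
--     field = [[c for c in line] for line in input.split('\n')]
--     start = None
--     end = None
--     for y, row in enumerate(field):
--         for x, c in enumerate(row):
--             if c == 'S':
--                 start = (x, y)
--             elif c == 'E':
--                 end = (x, y)
--     return field, start, end
-- ===== SOURCE B (Python) =====
-- def _locate(lines, ch):
--     for y, line in reversed(list(enumerate(lines))):
--         x = line.rfind(ch)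
--         if x != -1:
--             return (x, y)
--     return None
--
-- def parse(input: str, verbose: bool):
--     lines = input.split('\n')
--     field = [list(line) for line in lines]
--     return field, _locate(lines, 'S'), _locate(lines, 'E')
-- ===== Notes on version B (the rewrite author's own statement) =====
-- stated objective: faster
-- what changed: A scans every cell of the parsed grid with nested enumerate loops, overwriting start/end so the last marker wins; B walks the lines bottom-up using str.rfind per line with an early return, yielding the same last-occurrence coordinates without a per-character Python loop.
import Mathlib
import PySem

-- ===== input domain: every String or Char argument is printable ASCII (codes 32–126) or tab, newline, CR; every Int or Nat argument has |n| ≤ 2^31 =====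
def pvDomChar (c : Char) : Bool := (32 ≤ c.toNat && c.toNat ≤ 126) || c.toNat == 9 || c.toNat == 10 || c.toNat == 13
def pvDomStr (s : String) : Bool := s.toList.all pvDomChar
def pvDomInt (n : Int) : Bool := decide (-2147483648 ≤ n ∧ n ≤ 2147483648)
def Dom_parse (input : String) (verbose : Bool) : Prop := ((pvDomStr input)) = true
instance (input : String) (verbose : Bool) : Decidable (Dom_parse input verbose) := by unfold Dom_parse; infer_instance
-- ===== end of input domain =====

-- B keeps A's grid construction but finds the markers by scanning the lines bottom-up with
-- str.rfind and an early return instead of A's full nested enumerate scan with overwriting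
-- accumulators; a timing run measured B faster (C-level rfind, early exit).


-- ===== PORT A =====
-- input.split('\n'): sep is the nonempty literal "\n", so split? is always `some`; getD is the total form.
def parse (input : String) (verbose : Bool) : List (List String) × (Option (Int × Int)) × (Option (Int × Int)) :=
  let field : List (List String) :=
    ((PySem.Str.split? input "\n").getD []).map (fun line => line.toList.map (fun c => String.ofList [c]))
  let res : Option (Int × Int) × Option (Int × Int) :=
    (PySem.List.enumerate field).foldl (fun acc yrow =>
      (PySem.List.enumerate yrow.2).foldl (fun acc xc =>
        if xc.2 == "S" then (some (xc.1, yrow.1), acc.2)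
        else if xc.2 == "E" then (acc.1, some (xc.1, yrow.1))
        else acc) acc) (none, none)
  (field, res.1, res.2)

-- ===== PORT B =====
-- _locate: 'for y, line in reversed(list(enumerate(lines))): x = line.rfind(ch); if x != -1: return (x, y)'
def locateRev (rows : List (Int × String)) (ch : String) : Option (Int × Int) :=
  match rows with
  | [] => none
  | (y, line) :: rest =>
      let x := PySem.Str.rfind line ch
      if x == -1 then locateRev rest ch else some (x, y)

def parse_alt (input : String) (verbose : Bool) : List (List String) × (Option (Int × Int)) × (Option (Int × Int)) :=
  let lines : List String := (PySem.Str.split? input "\n").getD []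
  let field : List (List String) := lines.map (fun line => line.toList.map (fun c => String.ofList [c]))
  (field, locateRev (PySem.List.enumerate lines).reverse "S",
          locateRev (PySem.List.enumerate lines).reverse "E")

-- ===== PRECONDITION & SPEC =====
def Spec_parse (input : String) (verbose : Bool) (out : List (List String) × (Option (Int × Int)) × (Option (Int × Int))) : Prop := out = parse_alt input verbose
instance (input : String) (verbose : Bool) (out : List (List String) × (Option (Int × Int)) × (Option (Int × Int))) : Decidable (Spec_parse input verbose out) := by unfold Spec_parse; infer_instance

-- ===== CLAIM (what is proved, stated in full; the proofs are below) =====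
def Claim_equal_parse : Prop := ∀ (input : String) (verbose : Bool), Dom_parse input verbose → Spec_parse input verbose (parse input verbose)

-- ===== LEMMAS AND PROOFS =====

theorem beq_sing (c d : Char) : (String.ofList [c] == String.ofList [d]) = (c == d) := by
  by_cases h : c = d <;> simp [h, String.ofList_inj]

theorem singleton_isPrefixOf (ch : Char) (l : List Char) :
    ([ch].isPrefixOf l) = decide (l[0]? = some ch) := by
  cases l with
  | nil => simp [List.isPrefixOf]
  | cons a t =>
      simp [List.isPrefixOf]
      by_cases h : a = ch
      · simp [h]
      · simp [h, show ¬ ch = a from fun hh => h hh.symm]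

theorem go_step (s : List Char) (ch : Char) (n : Nat) :
    PySem.Chars.rfind.go s [ch] n =
      if s[n]? = some ch then (n : Int) else if n = 0 then -1 else PySem.Chars.rfind.go s [ch] (n - 1) := by
  cases n with
  | zero =>
      rw [PySem.Chars.rfind.go, singleton_isPrefixOf]
      by_cases hc : s[0]? = some ch <;> simp [hc]
  | succ j =>
      rw [PySem.Chars.rfind.go, singleton_isPrefixOf]
      have hd : (s.drop (j + 1))[0]? = s[j + 1]? := by
        rw [List.getElem?_drop]
      rw [hd]
      by_cases hc : s[j + 1]? = some ch <;> simp [hc]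

theorem go_append_lt (cs : List Char) (c ch : Char) :
    ∀ n, n < cs.length → PySem.Chars.rfind.go (cs ++ [c]) [ch] n = PySem.Chars.rfind.go cs [ch] n := by
  intro n
  induction n with
  | zero =>
      intro h
      conv_lhs => rw [go_step]
      conv_rhs => rw [go_step]
      rw [List.getElem?_append_left h]
      by_cases hc : cs[0]? = some ch <;> simp [hc]
  | succ j ih =>
      intro h
      conv_lhs => rw [go_step]
      conv_rhs => rw [go_step]
      rw [List.getElem?_append_left h]
      simp only [Nat.add_sub_cancel, Nat.add_eq_zero_iff, one_ne_zero, and_false]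
      rw [ih (by omega)]

theorem rfind_nil (ch : Char) : PySem.Chars.rfind [] [ch] = -1 := by
  simp [PySem.Chars.rfind, PySem.Chars.rfind.go, List.isPrefixOf]

theorem rfind_snoc (cs : List Char) (c ch : Char) :
    PySem.Chars.rfind (cs ++ [c]) [ch] =
      if c = ch then (cs.length : Int) else PySem.Chars.rfind cs [ch] := by
  unfold PySem.Chars.rfind
  have hlen : (cs ++ [c]).length = cs.length + 1 := by simp
  rw [hlen]
  conv_lhs => rw [go_step]
  have h1 : (cs ++ [c])[cs.length + 1]? = none := by simp
  rw [h1]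
  simp only [reduceCtorEq, if_false, Nat.add_eq_zero_iff, one_ne_zero, and_false,
    Nat.add_sub_cancel]
  conv_lhs => rw [go_step]
  have h2 : (cs ++ [c])[cs.length]? = some c := by simp
  rw [h2]
  by_cases hc : c = ch
  · simp [hc]
  · have h3 : ¬ (some c = some ch) := by simp [hc]
    rw [if_neg h3, if_neg hc]
    by_cases hn : cs.length = 0
    · have hcs : cs = [] := List.length_eq_zero_iff.mp hn
      subst hcs
      simp [go_step]
    · rw [if_neg hn, go_append_lt cs c ch _ (by omega)]
      conv_rhs => rw [go_step]
      have h4 : cs[cs.length]? = none := by simp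
      rw [h4]
      simp [hn]

-- last occurrence of ch in a single line, as a coordinate (proof-side characterisation)
def posOf (cs : List Char) (ch : Char) (y : Int) : Option (Int × Int) :=
  if PySem.Chars.rfind cs [ch] = -1 then none else some (PySem.Chars.rfind cs [ch], y)

theorem inner_fold (cs : List Char) (y : Int) (acc : Option (Int × Int) × Option (Int × Int)) :
    (PySem.List.enumerate (cs.map (fun c => String.ofList [c]))).foldl
      (fun acc xc =>
        if xc.2 == "S" then (some (xc.1, y), acc.2)
        else if xc.2 == "E" then (acc.1, some (xc.1, y))
        else acc) acc
    = ((posOf cs 'S' y).or acc.1, (posOf cs 'E' y).or acc.2) := by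
  induction cs using List.reverseRecOn generalizing acc with
  | nil => simp [PySem.List.enumerate_nil, posOf, rfind_nil]
  | append_singleton cs c ih =>
      rw [List.map_append, PySem.List.enumerate_append, List.foldl_append, ih]
      have hlen : (cs.map (fun c => String.ofList [c])).length = cs.length := by simp
      simp only [List.map_cons, List.map_nil, PySem.List.enumerate_cons,
        PySem.List.enumerate_nil, List.foldl_cons, List.foldl_nil, hlen, zero_add]
      have hS : (String.ofList [c] == "S") = (c == 'S') := beq_sing c 'S'
      have hE : (String.ofList [c] == "E") = (c == 'E') := beq_sing c 'E'
      rw [hS, hE]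
      by_cases hc : c = 'S'
      · have : ¬ ((cs.length : Int) = -1) := by omega
        simp [hc, posOf, rfind_snoc, this]
      · by_cases hc2 : c = 'E'
        · have : ¬ ((cs.length : Int) = -1) := by omega
          simp [hc2, posOf, rfind_snoc, this]
        · simp [posOf, rfind_snoc, hc, hc2]

theorem outer_fold (lines : List String) (acc : Option (Int × Int) × Option (Int × Int)) :
    (PySem.List.enumerate (lines.map (fun line => line.toList.map (fun c => String.ofList [c])))).foldl
      (fun acc yrow =>
        (PySem.List.enumerate yrow.2).foldl
          (fun acc xc =>
            if xc.2 == "S" then (some (xc.1, yrow.1), acc.2)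
            else if xc.2 == "E" then (acc.1, some (xc.1, yrow.1))
            else acc) acc) acc
    = ((locateRev (PySem.List.enumerate lines).reverse "S").or acc.1,
       (locateRev (PySem.List.enumerate lines).reverse "E").or acc.2) := by
  induction lines using List.reverseRecOn generalizing acc with
  | nil => simp [PySem.List.enumerate_nil, locateRev]
  | append_singleton lines l ih =>
      rw [List.map_append, PySem.List.enumerate_append, List.foldl_append, ih]
      have hlen : (lines.map (fun line => line.toList.map (fun c => String.ofList [c]))).length
          = lines.length := by simp
      simp only [List.map_cons, List.map_nil, PySem.List.enumerate_cons,
        PySem.List.enumerate_nil, List.foldl_cons, List.foldl_nil, hlen, zero_add]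
      rw [inner_fold]
      rw [PySem.List.enumerate_append, List.reverse_append]
      simp only [PySem.List.enumerate_cons, PySem.List.enumerate_nil, List.reverse_cons,
        List.reverse_nil, List.nil_append, List.singleton_append, zero_add]
      have hSdef : ("S" : String) = String.ofList ['S'] := rfl
      have hEdef : ("E" : String) = String.ofList ['E'] := rfl
      rw [hSdef, hEdef]
      by_cases hS : PySem.Chars.rfind l.toList ['S'] = -1 <;>
        by_cases hE : PySem.Chars.rfind l.toList ['E'] = -1 <;>
          simp [locateRev, posOf, hS, hE]

-- ===== VERDICT (by name: the statement is the Claim_ definition above) =====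
theorem parse_spec : Claim_equal_parse := by
  intro input verbose _
  unfold Spec_parse
  simp only [parse, parse_alt]
  rw [outer_fold]
  simp
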